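-- pv_equiv track=rewrite | github.com/cl9bix/hazik | hazik/eljarasok/szamok.py | fel_7
-- ===== SOURCE A (Python) =====
-- def fel_7(lst):
--     van = False
--     for i in range(len(lst)):
--         db_oszto = 0
--         for j in range(1, lst[i] + 1):
--             if lst[i] % j == 0:
--                 db_oszto += 1
--         if db_oszto == 2:
--             van = True
--     return 'Van' if van == True else 'Nincs'
-- ===== SOURCE B (Python) =====
-- def _is_prime(x):
--     if x < 2:
--         return False
--     d = 2
--     while d * d <= x:
--         if x % d == 0:
--             return False
--         d += 1
--     return True
--
--
-- def fel_7(lst):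
--     return 'Van' if any(_is_prime(x) for x in lst) else 'Nincs'
-- ===== Notes on version B (the rewrite author's own statement) =====
-- stated objective: faster
-- what changed: Replaces A's full divisor count over 1..x for every element (no early exit) with a short-circuiting any() over a trial-division primality test that only tries divisors d with d*d <= x and stops at the first divisor / first prime found.
import Mathlib
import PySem

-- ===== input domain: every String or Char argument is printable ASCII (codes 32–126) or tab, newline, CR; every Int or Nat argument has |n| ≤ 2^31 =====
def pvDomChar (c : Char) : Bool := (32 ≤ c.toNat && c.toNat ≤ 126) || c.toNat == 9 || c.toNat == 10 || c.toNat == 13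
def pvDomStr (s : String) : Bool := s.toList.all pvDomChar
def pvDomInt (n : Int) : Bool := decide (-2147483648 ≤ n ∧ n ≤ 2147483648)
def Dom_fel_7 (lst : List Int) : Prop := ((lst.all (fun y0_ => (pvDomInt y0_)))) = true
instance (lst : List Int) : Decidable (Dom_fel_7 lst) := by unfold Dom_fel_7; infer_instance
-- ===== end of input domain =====

-- B replaces A's full divisor count over 1..x per element with a short-circuiting
-- any() over trial division by divisors d with d*d <= x.

-- ===== PORT A =====
def fel_7 (lst : List Int) : String :=
  let van := lst.foldl (fun van x =>
    let db_oszto := (PySem.List.pyRange 1 (x + 1) 1).foldl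
        (fun db j => if PySem.Int.mod x j = 0 then db + 1 else db) (0 : Int)
    if db_oszto = 2 then true else van) false
  if van then "Van" else "Nincs"

-- ===== PORT B =====
-- the `while d * d <= x` loop of Source B's _is_prime
def isPrimeLoop (x d : Int) : Bool :=
  if h : d * d ≤ x then
    if PySem.Int.mod x d = 0 then false
    else isPrimeLoop x (d + 1)
  else true
termination_by (x + 1 - d).toNat
decreasing_by
  have hdx : d ≤ x := by
    rcases le_or_gt d 0 with h0 | h0
    · exact le_trans h0 (le_trans (mul_self_nonneg d) h)
    · calc d = d * 1 := (mul_one d).symm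
        _ ≤ d * d := mul_le_mul_of_nonneg_left h0 (le_of_lt h0)
        _ ≤ x := h
  omega

def isPrime (x : Int) : Bool := if x < 2 then false else isPrimeLoop x 2

def fel_7_alt (lst : List Int) : String :=
  if lst.any isPrime then "Van" else "Nincs"

-- ===== PRECONDITION & SPEC =====
def Spec_fel_7 (lst : List Int) (out : String) : Prop := out = fel_7_alt lst
instance (lst : List Int) (out : String) : Decidable (Spec_fel_7 lst out) := by unfold Spec_fel_7; infer_instance

-- ===== CLAIM (what is proved, stated in full; the proofs are below) =====
def Claim_equal_fel_7 : Prop := ∀ (lst : List Int), Dom_fel_7 lst → Spec_fel_7 lst (fel_7 lst)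

-- ===== LEMMAS AND PROOFS =====

-- A's inner counting loop is a countP
theorem foldl_count (p : Int → Prop) [DecidablePred p] (l : List Int) (a : Int) :
    l.foldl (fun db j => if p j then db + 1 else db) a
      = a + (l.countP (fun j => decide (p j)) : Int) := by
  induction l generalizing a with
  | nil => simp
  | cons hd tl ih =>
    by_cases hp : p hd <;> simp [hp, ih] <;> ring

-- A's outer flag loop is an any
theorem foldl_flag (p : Int → Prop) [DecidablePred p] (l : List Int) (b : Bool) :
    l.foldl (fun v x => if p x then true else v) b = (b || l.any (fun x => decide (p x))) := by
  induction l generalizing b with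
  | nil => simp
  | cons hd tl ih =>
    by_cases hp : p hd
    · simp only [List.foldl_cons, if_pos hp, ih, List.any_cons, decide_eq_true hp,
        Bool.true_or, Bool.or_true]
    · simp only [List.foldl_cons, if_neg hp, ih, List.any_cons,
        decide_eq_false hp, Bool.false_or]

-- A's divisor count over range(1, n+1) is the cardinality of a divisor filter
theorem countA_eq (n : ℕ) :
    (PySem.List.pyRange 1 ((n : ℤ) + 1) 1).foldl
        (fun db j => if PySem.Int.mod (n : ℤ) j = 0 then db + 1 else db) (0 : Int)
      = (((Finset.range n).filter (fun k => decide ((k + 1) ∣ n) = true)).card : Int) := by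
  rw [foldl_count (fun j => PySem.Int.mod (n : ℤ) j = 0)]
  rw [PySem.List.pyRange_one, List.countP_map]
  have h1 : (((n : ℤ) + 1 - 1).toNat) = n := by omega
  rw [h1]
  have h2 : ∀ k ∈ List.range n,
      (((fun j => decide (PySem.Int.mod (n : ℤ) j = 0)) ∘ (fun k : ℕ => (1 : ℤ) + k)) k = true
        ↔ (fun k => decide ((k + 1) ∣ n)) k = true) := by
    intro k _
    simp only [Function.comp_apply, decide_eq_true_eq]
    rw [PySem.Int.mod_eq_zero_iff_dvd, add_comm]
    norm_cast
  rw [List.countP_congr h2]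
  rw [show (List.range n).countP (fun k => decide ((k + 1) ∣ n))
      = ((Finset.range n).filter (fun k => decide ((k + 1) ∣ n) = true)).card from by
    classical
    rw [Finset.card, Finset.filter_val, Finset.range_val, ← Multiset.countP_eq_card_filter]
    simp [Multiset.range]]
  simp

-- exactly two divisors in [1, n] means prime
theorem card_filter_eq_two_iff (n : ℕ) (hn : 2 ≤ n) :
    ((Finset.range n).filter (fun k => decide ((k + 1) ∣ n) = true)).card = 2 ↔ n.Prime := by
  classical
  have hmem : ∀ k, k ∈ (Finset.range n).filter (fun k => decide ((k + 1) ∣ n) = true)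
      ↔ (k < n ∧ (k + 1) ∣ n) := by
    intro k; simp [Finset.mem_filter]
  constructor
  · intro hcard
    rw [Nat.prime_def_lt']
    refine ⟨hn, ?_⟩
    intro m hm2 hmn hdvd
    have hsub : ({0, m - 1, n - 1} : Finset ℕ)
        ⊆ (Finset.range n).filter (fun k => decide ((k + 1) ∣ n) = true) := by
      intro k hk
      simp only [Finset.mem_insert, Finset.mem_singleton] at hk
      rw [hmem]
      rcases hk with rfl | rfl | rfl
      · exact ⟨by omega, Nat.one_dvd n⟩
      · refine ⟨by omega, ?_⟩
        rw [Nat.sub_add_cancel (by omega)]; exact hdvd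
      · refine ⟨by omega, ?_⟩
        rw [Nat.sub_add_cancel (by omega)]
    have hc3 : ({0, m - 1, n - 1} : Finset ℕ).card = 3 := by
      rw [Finset.card_insert_of_notMem (by simp; omega),
          Finset.card_insert_of_notMem (by simp; omega), Finset.card_singleton]
    have := Finset.card_le_card hsub
    omega
  · intro hp
    have heq : (Finset.range n).filter (fun k => decide ((k + 1) ∣ n) = true) = {0, n - 1} := by
      ext k
      rw [hmem]
      simp only [Finset.mem_insert, Finset.mem_singleton]
      constructor
      · rintro ⟨hk, hdvd⟩
        rcases (Nat.dvd_prime hp).1 hdvd with h1 | h1 <;> omega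
      · rintro (rfl | rfl)
        · exact ⟨by omega, Nat.one_dvd n⟩
        · exact ⟨by omega, by rw [Nat.sub_add_cancel (by omega)]⟩
    rw [heq, Finset.card_insert_of_notMem (by simp; omega), Finset.card_singleton]

-- B's trial-division loop, characterised
theorem loop_iff (x d : Int) (hd : 2 ≤ d) :
    isPrimeLoop x d = true ↔ ∀ e : Int, d ≤ e → e * e ≤ x → PySem.Int.mod x e ≠ 0 := by
  revert hd
  fun_induction isPrimeLoop x d with
  | case1 d h hm =>
    intro _
    simp only [Bool.false_eq_true, false_iff, not_forall]
    exact ⟨d, le_refl d, h, by simpa using hm⟩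
  | case2 d h hm ih =>
    intro hd
    rw [ih (by omega)]
    constructor
    · intro hall e he hee
      rcases eq_or_lt_of_le he with rfl | hlt
      · simpa using hm
      · exact hall e (by omega) hee
    · intro hall e he hee
      exact hall e (by omega) hee
  | case3 d h =>
    intro hd
    simp only [true_iff]
    intro e he hee _
    have : d * d ≤ e * e := mul_le_mul he he (by omega) (by omega)
    omega

-- no divisor up to the square root means prime
theorem prime_bridge (n : ℕ) (hn : 2 ≤ n) :
    (∀ e : ℤ, 2 ≤ e → e * e ≤ (n : ℤ) → PySem.Int.mod (n : ℤ) e ≠ 0) ↔ n.Prime := by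
  rw [Nat.prime_def_le_sqrt]
  constructor
  · intro h
    refine ⟨hn, ?_⟩
    intro m hm2 hms hdvd
    have hmm : ((m : ℤ)) * (m : ℤ) ≤ (n : ℤ) := by exact_mod_cast Nat.le_sqrt.1 hms
    exact h m (by exact_mod_cast hm2) hmm
      (by rw [PySem.Int.mod_eq_zero_iff_dvd]; exact_mod_cast hdvd)
  · rintro ⟨-, h⟩ e he hee hmod
    have he0 : 0 ≤ e := by omega
    lift e to ℕ using he0 with m
    refine h m (by exact_mod_cast he) (Nat.le_sqrt.2 (by exact_mod_cast hee)) ?_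
    rw [PySem.Int.mod_eq_zero_iff_dvd] at hmod
    exact_mod_cast hmod

-- per-element: A's "has exactly two divisors" test equals B's primality test
theorem elem_eq (x : Int) :
    (decide ((PySem.List.pyRange 1 (x + 1) 1).foldl
        (fun db j => if PySem.Int.mod x j = 0 then db + 1 else db) (0 : Int) = 2))
      = isPrime x := by
  by_cases hx : x < 2
  · have hiso : isPrime x = false := by simp [isPrime, hx]
    rw [hiso, decide_eq_false_iff_not]
    intro hcount
    rcases lt_or_ge x 1 with h1 | h1
    · rw [PySem.List.pyRange_one_eq_nil (by omega)] at hcount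
      simp at hcount
    · have hx1 : x = 1 := by omega
      subst hx1
      revert hcount
      decide
  · push_neg at hx
    obtain ⟨n, rfl⟩ : ∃ n : ℕ, x = (n : ℤ) := ⟨x.toNat, by omega⟩
    have hn : 2 ≤ n := by exact_mod_cast hx
    have hR : isPrime (n : ℤ) = true ↔ n.Prime := by
      rw [isPrime, if_neg (by omega), loop_iff _ 2 le_rfl]
      exact prime_bridge n hn
    rw [countA_eq n]
    have hL : ((((Finset.range n).filter
        (fun k => decide ((k + 1) ∣ n) = true)).card : ℤ) = 2) ↔ n.Prime := by
      rw [← card_filter_eq_two_iff n hn]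
      constructor <;> intro h <;> exact_mod_cast h
    calc decide ((((Finset.range n).filter
          (fun k => decide ((k + 1) ∣ n) = true)).card : ℤ) = 2)
        = decide (isPrime (n : ℤ) = true) := decide_eq_decide.2 (hL.trans hR.symm)
      _ = isPrime (n : ℤ) := by simp

-- ===== VERDICT (by name: the statement is the Claim_ definition above) =====
theorem fel_7_spec : Claim_equal_fel_7 := by
  intro lst _
  unfold Spec_fel_7 fel_7 fel_7_alt
  show (if (lst.foldl (fun van x =>
      if ((PySem.List.pyRange 1 (x + 1) 1).foldl
          (fun db j => if PySem.Int.mod x j = 0 then db + 1 else db) (0 : Int) = 2)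
      then true else van) false) then "Van" else "Nincs")
    = (if lst.any isPrime then "Van" else "Nincs")
  rw [foldl_flag (fun x => (PySem.List.pyRange 1 (x + 1) 1).foldl
      (fun db j => if PySem.Int.mod x j = 0 then db + 1 else db) (0 : Int) = 2) lst false]
  rw [Bool.false_or]
  have hany : (lst.any fun x => decide ((PySem.List.pyRange 1 (x + 1) 1).foldl
      (fun db j => if PySem.Int.mod x j = 0 then db + 1 else db) (0 : Int) = 2))
      = lst.any isPrime := by
    congr 1
    funext x
    exact elem_eq x
  rw [hany]
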